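-- pv_equiv track=rewrite | github.com/Gmiller290488/bin_collection | bin-collection.py | count_the_mode_date_occurrences
-- ===== SOURCE A (Python) =====
-- def count_the_mode_date_occurrences(date_list):
--
--     temp_count = 1
--     count = 1
--     for i in range(len(date_list)-1):
--         temp = date_list[i][0]
--         if temp == date_list[i+1][0]:
--             temp_count += 1
--             if temp_count > count:
--                 count = temp_count
--         else:
--             temp_count = 1
--     return count
-- ===== SOURCE B (Python) =====
-- def count_the_mode_date_occurrences(date_list):
--     # boundary method: the longest run of equal first elements is the largest
--     # gap between consecutive positions where the key changes (bracketed by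
--     # -1 and the last index); max(... + [1]) yields 1 on empty input.
--     keys = [row[0] for row in date_list]
--     n = len(keys)
--     breaks = [i for i in range(n - 1) if keys[i] != keys[i + 1]]
--     bounds = [-1] + breaks + [n - 1]
--     gaps = [bounds[j + 1] - bounds[j] for j in range(len(bounds) - 1)]
--     return max(gaps + [1])
-- ===== Notes on version B (the rewrite author's own statement) =====
-- stated objective: alternative
-- what changed: A does one running scan keeping a temp_count/count pair; B computes the list of break positions where the key changes, brackets them with -1 and n-1, and returns the largest gap between consecutive boundaries.
-- outside the precondition, e.g. on count_the_mode_date_occurrences([[]]): A returns 1, B raises IndexError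
import Mathlib
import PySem

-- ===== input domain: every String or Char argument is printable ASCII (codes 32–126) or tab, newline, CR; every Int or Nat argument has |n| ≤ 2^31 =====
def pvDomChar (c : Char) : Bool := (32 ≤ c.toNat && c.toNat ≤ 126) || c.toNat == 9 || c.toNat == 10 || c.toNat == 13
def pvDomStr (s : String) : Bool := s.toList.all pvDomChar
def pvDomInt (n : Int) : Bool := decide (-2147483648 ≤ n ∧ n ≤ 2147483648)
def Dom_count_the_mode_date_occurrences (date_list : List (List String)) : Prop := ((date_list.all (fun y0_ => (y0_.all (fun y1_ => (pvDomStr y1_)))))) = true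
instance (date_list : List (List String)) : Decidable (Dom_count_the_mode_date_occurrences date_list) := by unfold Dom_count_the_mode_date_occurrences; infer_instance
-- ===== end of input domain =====

-- B replaces A's running temp_count/count scan by a boundary method: list the positions
-- where the first element changes, bracket them with -1 and n-1, and return the largest
-- gap between consecutive boundaries (alternative decomposition, same cost).
-- The proved claim is about return values on Pre_ (neither program mutates its argument).

-- ===== PORT A =====
def count_the_mode_date_occurrences (date_list : List (List String)) : Int :=
  let st := (PySem.List.pyRange 0 ((date_list.length : Int) - 1) 1).foldl
    (fun (st : Int × Int) i =>
      let temp := PySem.List.pyGetD (PySem.List.pyGetD date_list i []) 0 ""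
      if temp = PySem.List.pyGetD (PySem.List.pyGetD date_list (i + 1) []) 0 "" then
        let temp_count := st.1 + 1
        (temp_count, if temp_count > st.2 then temp_count else st.2)
      else
        (1, st.2))
    (1, 1)
  st.2

-- ===== PORT B =====
-- row[0] (in range under Pre_)
def pvKey (row : List String) : String := PySem.List.pyGetD row 0 ""

def count_the_mode_date_occurrences_alt (date_list : List (List String)) : Int :=
  let keys := date_list.map pvKey
  let n : Int := keys.length
  let breaks := (PySem.List.pyRange 0 (n - 1) 1).filter
    (fun i => PySem.List.pyGetD keys i "" ≠ PySem.List.pyGetD keys (i + 1) "")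
  let bounds := -1 :: breaks ++ [n - 1]
  let gaps := (PySem.List.pyRange 0 ((bounds.length : Int) - 1) 1).map
    (fun j => PySem.List.pyGetD bounds (j + 1) 0 - PySem.List.pyGetD bounds j 0)
  PySem.List.maxD (gaps ++ [1]) (fun x => x) 1

-- ===== PRECONDITION & SPEC =====
-- Pre_ excludes inputs containing an empty inner list: Python A raises IndexError on them
-- whenever it indexes (length ≥ 2), and B's row[0] raises on any of them; the only excluded
-- inputs on which A still returns are singleton lists whose sole row is empty (A returns 1, B raises).
def Pre_count_the_mode_date_occurrences (date_list : List (List String)) : Prop :=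
  ∀ row ∈ date_list, row ≠ []
instance (date_list : List (List String)) : Decidable (Pre_count_the_mode_date_occurrences date_list) := by unfold Pre_count_the_mode_date_occurrences; infer_instance

def pvWitness_count_the_mode_date_occurrences : List (List String) := [["a"], ["a"], ["b"]]

def Spec_count_the_mode_date_occurrences (date_list : List (List String)) (out : Int) : Prop := out = count_the_mode_date_occurrences_alt date_list
instance (date_list : List (List String)) (out : Int) : Decidable (Spec_count_the_mode_date_occurrences date_list out) := by unfold Spec_count_the_mode_date_occurrences; infer_instance

-- ===== CLAIM (what is proved, stated in full; the proofs are below) =====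
def Claim_equal_count_the_mode_date_occurrences : Prop := ∀ (date_list : List (List String)), Dom_count_the_mode_date_occurrences date_list → Pre_count_the_mode_date_occurrences date_list → Spec_count_the_mode_date_occurrences date_list (count_the_mode_date_occurrences date_list)

-- ===== LEMMAS AND PROOFS =====

-- A's loop body on the two compared keys
def pvStepA (st : Int × Int) (a b : String) : Int × Int :=
  if a = b then
    let tc := st.1 + 1
    (tc, if tc > st.2 then tc else st.2)
  else (1, st.2)

-- A's scan as structural recursion over the key list
def pvAdjFold : List String → Int × Int → Int × Int
  | [], st => st
  | [_], st => st
  | a :: b :: rest, st => pvAdjFold (b :: rest) (pvStepA st a b)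

-- the list of run lengths, starting inside a run of key k with current length n
def pvRuns : String → Int → List String → List Int
  | _, n, [] => [n]
  | k, n, x :: xs => if k = x then pvRuns x (n + 1) xs else n :: pvRuns x 1 xs

theorem pvRuns_cons_eq (k x : String) (n : Int) (xs : List String) :
    pvRuns k n (x :: xs) = if k = x then pvRuns x (n + 1) xs else n :: pvRuns x 1 xs := rfl

theorem pvRuns_cons (xs : List String) (k : String) (n : Int) :
    ∃ h t, pvRuns k n xs = h :: t ∧ n ≤ h := by
  induction xs generalizing k n with
  | nil => exact ⟨n, [], rfl, le_refl n⟩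
  | cons x xs ih =>
    by_cases hkx : k = x
    · obtain ⟨h, t, he, hle⟩ := ih x (n + 1)
      exact ⟨h, t, by simp [pvRuns, hkx, he], by omega⟩
    · exact ⟨n, pvRuns x 1 xs, by simp [pvRuns, hkx], le_refl n⟩

theorem pv_absorb (t : List Int) (c v h : Int) (hv : v ≤ h) :
    (h :: t).foldl max (max c v) = (h :: t).foldl max c := by
  simp only [List.foldl_cons]
  rw [max_assoc, max_eq_right hv]

-- A's scan computes the running max of the run lengths
theorem pvAdjFold_runs (xs : List String) (a : String) (tc c : Int)
    (h1 : 1 ≤ tc) (h2 : tc ≤ c) :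
    (pvAdjFold (a :: xs) (tc, c)).2 = (pvRuns a tc xs).foldl max c := by
  induction xs generalizing a tc c with
  | nil => simp [pvAdjFold, pvRuns, max_eq_left h2]
  | cons x xs ih =>
    by_cases hax : a = x
    · subst hax
      have hstep : pvStepA (tc, c) a a = (tc + 1, max c (tc + 1)) := by
        unfold pvStepA
        rw [if_pos rfl]
        show (tc + 1, if tc + 1 > c then tc + 1 else c) = (tc + 1, max c (tc + 1))
        have : (if tc + 1 > c then tc + 1 else c) = max c (tc + 1) := by
          rcases le_or_gt (tc + 1) c with h | h
          · rw [if_neg (by omega), max_eq_left h]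
          · rw [if_pos (by omega), max_eq_right (le_of_lt h)]
        rw [this]
      have hfold : pvAdjFold (a :: a :: xs) (tc, c) = pvAdjFold (a :: xs) (tc + 1, max c (tc + 1)) := by
        rw [show pvAdjFold (a :: a :: xs) (tc, c) = pvAdjFold (a :: xs) (pvStepA (tc, c) a a) from rfl, hstep]
      rw [hfold, ih a (tc + 1) (max c (tc + 1)) (by omega) (le_max_right _ _)]
      obtain ⟨h, t, he, hle⟩ := pvRuns_cons xs a (tc + 1)
      rw [show pvRuns a tc (a :: xs) = pvRuns a (tc + 1) xs from by rw [pvRuns_cons_eq, if_pos rfl]]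
      rw [he, pv_absorb t c (tc + 1) h hle]
    · have hfold : pvAdjFold (a :: x :: xs) (tc, c) = pvAdjFold (x :: xs) (1, c) := by
        rw [show pvAdjFold (a :: x :: xs) (tc, c) = pvAdjFold (x :: xs) (pvStepA (tc, c) a x) from rfl]
        unfold pvStepA
        rw [if_neg hax]
      rw [hfold, ih x 1 c (le_refl 1) (by omega)]
      rw [show pvRuns a tc (x :: xs) = tc :: pvRuns x 1 xs from by rw [pvRuns_cons_eq, if_neg hax]]
      rw [List.foldl_cons, max_eq_left h2]

-- A's port, rewritten as pvAdjFold over the key list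
theorem pvA_adjNat (keys : List String) (st : Int × Int) :
    (List.range (keys.length - 1)).foldl
      (fun st k => pvStepA st (keys.getD k "") (keys.getD (k + 1) "")) st
      = pvAdjFold keys st := by
  induction keys generalizing st with
  | nil => simp [pvAdjFold]
  | cons a t ih =>
    cases t with
    | nil => simp [pvAdjFold]
    | cons b rest =>
      have hlen : (a :: b :: rest).length - 1 = rest.length + 1 := by simp
      rw [hlen, List.range_succ_eq_map]
      simp only [List.foldl_cons, List.foldl_map]
      have hfun : (fun (st : Int × Int) (k : Nat) =>
          pvStepA st ((a :: b :: rest).getD (k + 1) "") ((a :: b :: rest).getD (k + 1 + 1) ""))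
          = fun st k => pvStepA st ((b :: rest).getD k "") ((b :: rest).getD (k + 1) "") := by
        funext st k
        simp [List.getD]
      have h0 : ((a :: b :: rest).getD 0 "") = a := rfl
      have h1 : ((a :: b :: rest).getD (0 + 1) "") = b := rfl
      rw [h0, h1, hfun]
      have := ih (pvStepA st a b)
      simp only [List.length_cons, Nat.add_sub_cancel] at this
      rw [this]
      rfl

theorem pv_foldl_funext {α β : Type} {f g : α → β → α} (h : ∀ a b, f a b = g a b)
    (l : List β) (i : α) : l.foldl f i = l.foldl g i := by
  induction l generalizing i with
  | nil => rfl
  | cons x t ih => rw [List.foldl_cons, List.foldl_cons, h, ih]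

theorem pvA_eq_adjFold (date_list : List (List String)) :
    count_the_mode_date_occurrences date_list
      = (pvAdjFold (date_list.map pvKey) (1, 1)).2 := by
  unfold count_the_mode_date_occurrences
  set keys := date_list.map pvKey with hkeys
  have hk : ∀ i : Int, PySem.List.pyGetD (PySem.List.pyGetD date_list i []) 0 ""
      = PySem.List.pyGetD keys i "" := by
    intro i
    rw [hkeys]
    rw [show ("" : String) = pvKey [] from rfl, PySem.List.pyGetD_map pvKey date_list i []]
    rfl
  have hlen : (date_list.length : Int) = (keys.length : Int) := by simp [hkeys]
  simp only [hk, hlen]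
  rw [PySem.List.pyRange_one]
  rw [show ((keys.length : Int) - 1 - 0).toNat = keys.length - 1 from by omega]
  rw [List.foldl_map, ← pvA_adjNat keys (1, 1)]
  refine congrArg Prod.snd (pv_foldl_funext ?_ _ _)
  intro st k
  rw [show (0 : Int) + (k : Int) = ((k : Nat) : Int) from by omega]
  rw [show ((k : Int) + 1) = (((k + 1 : Nat)) : Int) from by push_cast; ring]
  rw [PySem.List.pyGetD_natCast, PySem.List.pyGetD_natCast]
  rfl

-- ---- B side: boundaries and gaps ----

-- the break positions (indices k with keys[k] ≠ keys[k+1]), structurally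
def pvBrk : List String → List Nat
  | a :: b :: t => (if a ≠ b then [0] else []) ++ (pvBrk (b :: t)).map (· + 1)
  | _ => []

-- consecutive differences
def pvDiffs : List Int → List Int
  | a :: b :: t => (b - a) :: pvDiffs (b :: t)
  | _ => []

theorem pvBrk_filter (keys : List String) :
    (List.range (keys.length - 1)).filter
      (fun k => decide (keys.getD k "" ≠ keys.getD (k + 1) ""))
      = pvBrk keys := by
  induction keys with
  | nil => simp [pvBrk]
  | cons a t ih =>
    cases t with
    | nil => simp [pvBrk]
    | cons b rest =>
      have hlen : (a :: b :: rest).length - 1 = rest.length + 1 := by simp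
      rw [hlen, List.range_succ_eq_map, List.filter_cons, List.filter_map]
      have hfun : (fun (k : Nat) => decide ((a :: b :: rest).getD (k + 1) "" ≠ (a :: b :: rest).getD (k + 1 + 1) ""))
          = fun k => decide ((b :: rest).getD k "" ≠ (b :: rest).getD (k + 1) "") := by
        funext k
        simp [List.getD]
      have hcomp : (fun (k : Nat) => decide ((a :: b :: rest).getD k "" ≠ (a :: b :: rest).getD (k + 1) "")) ∘ (· + 1)
          = fun k => decide ((b :: rest).getD k "" ≠ (b :: rest).getD (k + 1) "") := by
        funext k
        simp [Function.comp, List.getD]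
      rw [hcomp]
      have hr : (b :: rest).length - 1 = rest.length := by simp
      rw [← hr, ih]
      show (if decide ((a :: b :: rest).getD 0 "" ≠ (a :: b :: rest).getD (0 + 1) "") = true
            then 0 :: (pvBrk (b :: rest)).map (· + 1)
            else (pvBrk (b :: rest)).map (· + 1)) = pvBrk (a :: b :: rest)
      by_cases hab : a = b
      · rw [if_neg (by simp [List.getD, hab])]
        simp [pvBrk, hab]
      · rw [if_pos (by simp [List.getD, hab])]
        simp [pvBrk, hab]

theorem pvGaps_diffs (L : List Int) :
    (List.range (L.length - 1)).map (fun j => L.getD (j + 1) 0 - L.getD j 0)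
      = pvDiffs L := by
  induction L with
  | nil => simp [pvDiffs]
  | cons a t ih =>
    cases t with
    | nil => simp [pvDiffs]
    | cons b rest =>
      have hlen : (a :: b :: rest).length - 1 = rest.length + 1 := by simp
      rw [hlen, List.range_succ_eq_map, List.map_cons, List.map_map]
      have hcomp : (fun (j : Nat) => (a :: b :: rest).getD (j + 1) 0 - (a :: b :: rest).getD j 0) ∘ (· + 1)
          = fun j => (b :: rest).getD (j + 1) 0 - (b :: rest).getD j 0 := by
        funext j
        simp [Function.comp, List.getD]
      rw [hcomp]
      have hr : (b :: rest).length - 1 = rest.length := by simp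
      rw [← hr, ih]
      simp [pvDiffs, List.getD]

-- changing the run's current length shifts only the head run length
theorem pvRuns_succ (xs : List String) (k : String) (n : Int) :
    ∃ h t, pvRuns k n xs = h :: t ∧ pvRuns k (n + 1) xs = (h + 1) :: t := by
  induction xs generalizing k n with
  | nil => exact ⟨n, [], rfl, rfl⟩
  | cons x xs ih =>
    by_cases hkx : k = x
    · obtain ⟨h, t, h1, h2⟩ := ih x (n + 1)
      exact ⟨h, t, by simp [pvRuns, hkx, h1], by simp [pvRuns, hkx, h2]⟩
    · exact ⟨n, pvRuns x 1 xs, by simp [pvRuns, hkx], by simp [pvRuns, hkx]⟩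

theorem pvDiffs_ne_nil_head (c : Int) (h : Int) (T : List Int) :
    pvDiffs (c :: h :: T) = (h - c) :: pvDiffs (h :: T) := rfl

-- the gaps between consecutive boundaries are exactly the run lengths
theorem pvDiffs_brk (rest : List String) (a : String) (c : Int) :
    pvDiffs (c :: (pvBrk (a :: rest)).map (fun (k : Nat) => c + 1 + (k : Int)) ++ [c + ((rest.length : Int) + 1)])
      = pvRuns a 1 rest := by
  induction rest generalizing a c with
  | nil =>
    show pvDiffs [c, c + (0 + 1)] = pvRuns a 1 []
    simp [pvDiffs, pvRuns]
  | cons x xs ih =>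
    by_cases hax : a = x
    · -- no break at position 0; the first run gets longer
      have hbrk : pvBrk (a :: x :: xs) = (pvBrk (x :: xs)).map (· + 1) := by
        simp [pvBrk, hax]
      have hmap : ((pvBrk (x :: xs)).map (· + 1)).map (fun (k : Nat) => c + 1 + (k : Int))
          = (pvBrk (x :: xs)).map (fun (k : Nat) => (c + 1) + 1 + (k : Int)) := by
        rw [List.map_map]
        refine List.map_congr_left ?_
        intro k _
        simp only [Function.comp]
        push_cast
        ring
      have hlast : c + (((x :: xs).length : Int) + 1) = (c + 1) + ((xs.length : Int) + 1) := by
        simp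
        ring
      rw [hbrk, hmap, hlast]
      have hih := ih x (c + 1)
      simp only [List.cons_append] at hih ⊢
      obtain ⟨h, t, h1, h2⟩ := pvRuns_succ xs x 1
      cases hT : (pvBrk (x :: xs)).map (fun (k : Nat) => (c + 1) + 1 + (k : Int)) ++ [(c + 1) + ((xs.length : Int) + 1)] with
      | nil => exact absurd hT (by simp)
      | cons y T =>
        rw [hT] at hih
        rw [pvDiffs_ne_nil_head] at hih
        rw [pvDiffs_ne_nil_head]
        rw [h1] at hih
        have hy : y - (c + 1) = h := (List.cons.injEq _ _ _ _).mp hih |>.1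
        have ht : pvDiffs (y :: T) = t := (List.cons.injEq _ _ _ _).mp hih |>.2
        rw [pvRuns_cons_eq, if_pos hax, ← hax]
        rw [show (1 : Int) + 1 = (1 : Int) + 1 from rfl] at h2
        rw [hax, h2, ht]
        congr 1
        omega
    · -- a break at position 0
      have hbrk : pvBrk (a :: x :: xs) = 0 :: (pvBrk (x :: xs)).map (· + 1) := by
        simp [pvBrk, hax]
      have hmap : ((pvBrk (x :: xs)).map (· + 1)).map (fun (k : Nat) => c + 1 + (k : Int))
          = (pvBrk (x :: xs)).map (fun (k : Nat) => (c + 1) + 1 + (k : Int)) := by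
        rw [List.map_map]
        refine List.map_congr_left ?_
        intro k _
        simp only [Function.comp]
        push_cast
        ring
      have hlast : c + (((x :: xs).length : Int) + 1) = (c + 1) + ((xs.length : Int) + 1) := by
        simp
        ring
      rw [hbrk, List.map_cons, hmap, hlast]
      simp only [List.cons_append]
      rw [show c + 1 + ((0 : Nat) : Int) = c + 1 from by simp]
      cases hT : (pvBrk (x :: xs)).map (fun (k : Nat) => (c + 1) + 1 + (k : Int)) ++ [(c + 1) + ((xs.length : Int) + 1)] with
      | nil => exact absurd hT (by simp)
      | cons y T =>
        rw [pvDiffs_ne_nil_head]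
        have hih := ih x (c + 1)
        simp only [List.cons_append] at hih
        rw [hT] at hih
        rw [pvRuns_cons_eq, if_neg hax, ← hih]
        congr 1
        ring

-- the common value: max run length of the key list (1 when empty)
def pvBSpec : List String → Int
  | [] => 1
  | a :: rest => (pvRuns a 1 rest).foldl max 1

theorem pvB_eq (date_list : List (List String)) :
    count_the_mode_date_occurrences_alt date_list = pvBSpec (date_list.map pvKey) := by
  show (let keys := date_list.map pvKey
        let n : Int := keys.length
        let breaks := (PySem.List.pyRange 0 (n - 1) 1).filter
          (fun i => PySem.List.pyGetD keys i "" ≠ PySem.List.pyGetD keys (i + 1) "")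
        let bounds := -1 :: breaks ++ [n - 1]
        let gaps := (PySem.List.pyRange 0 ((bounds.length : Int) - 1) 1).map
          (fun j => PySem.List.pyGetD bounds (j + 1) 0 - PySem.List.pyGetD bounds j 0)
        PySem.List.maxD (gaps ++ [1]) (fun x => x) 1) = _
  simp only []
  set keys := date_list.map pvKey with hkeys
  clear hkeys
  -- the break-position comprehension is pvBrk
  have hb : (PySem.List.pyRange 0 ((keys.length : Int) - 1) 1).filter
      (fun i => PySem.List.pyGetD keys i "" ≠ PySem.List.pyGetD keys (i + 1) "")
      = (pvBrk keys).map (fun (k : Nat) => (k : Int)) := by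
    rw [PySem.List.pyRange_one,
        show (((keys.length : Int) - 1) - 0).toNat = keys.length - 1 from by omega,
        List.filter_map]
    rw [← pvBrk_filter keys]
    have hpred : ∀ k : Nat,
        (decide (PySem.List.pyGetD keys ((0 : Int) + (k : Int)) "" ≠ PySem.List.pyGetD keys (((0 : Int) + (k : Int)) + 1) ""))
          = decide (keys.getD k "" ≠ keys.getD (k + 1) "") := by
      intro k
      rw [show (0 : Int) + (k : Int) = ((k : Nat) : Int) from by omega]
      rw [show (((k : Nat) : Int) + 1) = (((k + 1 : Nat)) : Int) from by push_cast; ring]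
      rw [PySem.List.pyGetD_natCast, PySem.List.pyGetD_natCast]
    have hfilter : ((List.range (keys.length - 1)).filter
          ((fun i => decide (PySem.List.pyGetD keys i "" ≠ PySem.List.pyGetD keys (i + 1) "")) ∘ (fun (k : Nat) => (0 : Int) + (k : Int))))
        = (List.range (keys.length - 1)).filter (fun k => decide (keys.getD k "" ≠ keys.getD (k + 1) "")) := by
      refine List.filter_congr ?_
      intro k _
      exact hpred k
    rw [hfilter]
    refine List.map_congr_left ?_
    intro k _
    omega
  rw [hb]
  -- the gap comprehension is pvDiffs
  have hg : ∀ L : List Int,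
      (PySem.List.pyRange 0 ((L.length : Int) - 1) 1).map
        (fun j => PySem.List.pyGetD L (j + 1) 0 - PySem.List.pyGetD L j 0)
        = pvDiffs L := by
    intro L
    rw [PySem.List.pyRange_one,
        show (((L.length : Int) - 1) - 0).toNat = L.length - 1 from by omega,
        List.map_map]
    rw [← pvGaps_diffs L]
    refine List.map_congr_left ?_
    intro k _
    simp only [Function.comp]
    rw [show (0 : Int) + (k : Int) = ((k : Nat) : Int) from by omega]
    rw [show (((k : Nat) : Int) + 1) = (((k + 1 : Nat)) : Int) from by push_cast; ring]
    rw [PySem.List.pyGetD_natCast, PySem.List.pyGetD_natCast]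
  rw [hg]
  cases keys with
  | nil => decide
  | cons a rest =>
    show _ = (pvRuns a 1 rest).foldl max 1
    -- the boundary list matches pvDiffs_brk's shape
    have hshape : (-1 : Int) :: (pvBrk (a :: rest)).map (fun (k : Nat) => (k : Int)) ++ [((a :: rest).length : Int) - 1]
        = (-1 : Int) :: (pvBrk (a :: rest)).map (fun (k : Nat) => (-1 : Int) + 1 + (k : Int)) ++ [(-1 : Int) + ((rest.length : Int) + 1)] := by
      have h1 : (pvBrk (a :: rest)).map (fun (k : Nat) => (k : Int))
          = (pvBrk (a :: rest)).map (fun (k : Nat) => (-1 : Int) + 1 + (k : Int)) := by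
        refine List.map_congr_left ?_
        intro k _
        omega
      have h2 : ((a :: rest).length : Int) - 1 = (-1 : Int) + ((rest.length : Int) + 1) := by
        simp
      rw [h1, h2]
    rw [show pvDiffs ((-1 : Int) :: (pvBrk (a :: rest)).map (fun (k : Nat) => (k : Int)) ++ [((a :: rest).length : Int) - 1])
        = pvRuns a 1 rest from by rw [hshape]; exact pvDiffs_brk rest a (-1)]
    obtain ⟨h, t, he, hle⟩ := pvRuns_cons rest a 1
    rw [he]
    show PySem.List.maxD ((h :: t) ++ [1]) (fun x => x) 1 = (h :: t).foldl max 1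
    rw [List.cons_append]
    unfold PySem.List.maxD
    rw [PySem.List.max?_id_cons, Option.getD_some]
    rw [List.foldl_append, List.foldl_cons, List.foldl_cons, List.foldl_nil]
    have hhf := (PySem.List.le_foldl_max t h).1
    rw [max_eq_left (le_trans hle hhf), max_eq_right hle]

-- ===== VERDICT (by name: the statement is the Claim_ definition above) =====
theorem count_the_mode_date_occurrences_spec : Claim_equal_count_the_mode_date_occurrences := by
  intro date_list _ _
  unfold Spec_count_the_mode_date_occurrences
  rw [pvA_eq_adjFold, pvB_eq]
  cases hk : date_list.map pvKey with
  | nil => simp [pvAdjFold, pvBSpec]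
  | cons a rest =>
    show (pvAdjFold (a :: rest) (1, 1)).2 = pvBSpec (a :: rest)
    rw [show pvBSpec (a :: rest) = (pvRuns a 1 rest).foldl max 1 from rfl]
    exact pvAdjFold_runs rest a 1 1 (le_refl 1) (le_refl 1)
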